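-- pv_equiv track=rewrite | github.com/mitchellgilesdev/CITS1401-Project2 | project2.py | conjunctions
-- ===== SOURCE A (Python) =====
-- def conjunctions(lines):
--     conj_list = {
--         "also": 0, "although": 0, "and": 0, "as": 0, "because": 0, "before": 0, "but": 0, "for": 0, "if": 0,
--         "nor": 0, "of": 0, "or": 0, "since": 0, "that": 0, "though": 0, "until": 0, "when": 0, "whenever": 0,
--         "whereas": 0, "which": 0, "while": 0, "yet": 0
--     }
--
--     for line in lines:
--         line = line.replace("--", " ")
--         words = line.split()
--         for word in words:
--             word = word.lower()
--             new_word = ""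
--             for char in word:
--                 if char.isalpha():
--                     new_word += char
--             if new_word in conj_list:
--                 conj_list.update({new_word: conj_list.get(new_word) + 1})
--
--     return conj_list
-- ===== SOURCE B (Python) =====
-- _CONJ = ("also", "although", "and", "as", "because", "before", "but", "for", "if",
--          "nor", "of", "or", "since", "that", "though", "until", "when", "whenever",
--          "whereas", "which", "while", "yet")
--
--
-- def conjunctions(lines):
--     # pass 1: clean every token and tally ALL words
--     words = [
--         "".join(ch for ch in tok.lower() if ch.isalpha())
--         for line in lines
--         for tok in line.replace("--", " ").split()
--     ]
--     freq = {}
--     for w in words: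
--         freq[w] = freq.get(w, 0) + 1
--     # pass 2: select the conjunction counts
--     return {c: freq.get(c, 0) for c in _CONJ}
-- ===== Notes on version B (the rewrite author's own statement) =====
-- stated objective: alternative
-- what changed: A checks each cleaned word against the conjunction dict and increments on match; B first builds a frequency table of ALL cleaned words in one tallying pass and then selects the 22 conjunction counts from it in a second pass.
import Mathlib
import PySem

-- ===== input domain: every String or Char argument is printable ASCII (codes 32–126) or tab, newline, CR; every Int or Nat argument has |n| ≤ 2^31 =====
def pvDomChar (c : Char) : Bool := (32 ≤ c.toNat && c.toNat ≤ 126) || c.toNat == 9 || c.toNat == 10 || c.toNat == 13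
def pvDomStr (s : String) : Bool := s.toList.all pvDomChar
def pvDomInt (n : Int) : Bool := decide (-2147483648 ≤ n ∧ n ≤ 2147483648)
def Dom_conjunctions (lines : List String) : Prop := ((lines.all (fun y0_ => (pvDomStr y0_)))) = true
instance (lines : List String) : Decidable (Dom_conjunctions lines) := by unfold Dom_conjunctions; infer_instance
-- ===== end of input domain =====

-- B tallies all cleaned words into one frequency table, then selects the 22 conjunction counts (alternative decomposition, same cost).

-- the 22 conjunction keys in A's dict-literal order (shared constant)
def conjKeys : List String :=
  ["also", "although", "and", "as", "because", "before", "but", "for", "if",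
   "nor", "of", "or", "since", "that", "though", "until", "when", "whenever",
   "whereas", "which", "while", "yet"]

-- ===== PORT A =====
-- A's per-word cleanup: lowercase, then build new_word char by char keeping isalpha chars
def pvCleanA (word : String) : String :=
  String.mk ((PySem.Str.lower word).toList.foldl
    (fun acc c => if PySem.Chars.isalpha c then acc ++ [c] else acc) [])

def conjunctions (lines : List String) : List (String × Int) :=
  (lines.foldl (fun d line =>
      (PySem.Str.split₀ (PySem.Str.replace line "--" " ")).foldl
        (fun d word =>
          let nw := pvCleanA word
          if d.contains nw then d.insert nw (d.getD nw 0 + 1) else d) d)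
    (PySem.Dict.ofList (conjKeys.map (fun k => (k, (0 : Int)))))).items

-- ===== PORT B =====
-- B's per-token cleanup: lowercase then filter isalpha ("".join comprehension)
def pvCleanB (tok : String) : String :=
  String.mk ((PySem.Str.lower tok).toList.filter PySem.Chars.isalpha)

def conjunctions_alt (lines : List String) : List (String × Int) :=
  let words := lines.flatMap
    (fun line => (PySem.Str.split₀ (PySem.Str.replace line "--" " ")).map pvCleanB)
  let freq := words.foldl (fun d w => d.insert w (d.getD w 0 + 1))
    (PySem.Dict.empty : PySem.Dict String Int)
  conjKeys.map (fun c => (c, freq.getD c 0))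

-- ===== PRECONDITION & SPEC =====
def Spec_conjunctions (lines : List String) (out : List (String × Int)) : Prop := out = conjunctions_alt lines
instance (lines : List String) (out : List (String × Int)) : Decidable (Spec_conjunctions lines out) := by unfold Spec_conjunctions; infer_instance

-- ===== CLAIM (what is proved, stated in full; the proofs are below) =====
def Claim_equal_conjunctions : Prop := ∀ (lines : List String), Dom_conjunctions lines → Spec_conjunctions lines (conjunctions lines)

-- ===== LEMMAS AND PROOFS =====

theorem pvClean_eq : pvCleanA = pvCleanB := by
  funext w
  unfold pvCleanA pvCleanB
  rw [PySem.List.foldl_append_if]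
  simp

-- the flat cleaned-word stream (proof-side abbreviation)
def pvWords (lines : List String) : List String :=
  lines.flatMap
    (fun line => (PySem.Str.split₀ (PySem.Str.replace line "--" " ")).map pvCleanB)

-- A's loop body on an already-cleaned word
def pvStepA (d : PySem.Dict String Int) (nw : String) : PySem.Dict String Int :=
  if d.contains nw then d.insert nw (d.getD nw 0 + 1) else d

theorem conjKeys_nodup : conjKeys.Nodup := by decide

theorem pvLoopA (ws : List String) (d : PySem.Dict String Int) (hk : d.keys = conjKeys) :
    (ws.foldl pvStepA d).keys = conjKeys ∧
    ∀ k ∈ conjKeys, (ws.foldl pvStepA d).getD k 0 = d.getD k 0 + ws.count k := by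
  induction ws generalizing d with
  | nil => exact ⟨hk, fun k _ => by simp⟩
  | cons w ws ih =>
    simp only [List.foldl_cons]
    by_cases h : d.contains w = true
    · have hk' : (pvStepA d w).keys = conjKeys := by
        simp only [pvStepA, h, if_true]
        rw [PySem.Dict.keys_insert_of_contains]
        · exact hk
        · exact h
      obtain ⟨h1, h2⟩ := ih (pvStepA d w) hk'
      refine ⟨h1, fun k hkmem => ?_⟩
      rw [h2 k hkmem]
      simp only [pvStepA, h, if_true, PySem.Dict.getD_insert, List.count_cons]
      by_cases hwk : k = w
      · subst hwk; simp; ring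
      · simp [hwk, Ne.symm hwk]
    · have hwne : w ∉ conjKeys := by
        rw [← hk]; intro hm
        exact h ((PySem.Dict.contains_iff_mem_keys d w).2 hm)
      have hstep : pvStepA d w = d := by simp [pvStepA, h]
      rw [hstep]
      obtain ⟨h1, h2⟩ := ih d hk
      refine ⟨h1, fun k hkmem => ?_⟩
      rw [h2 k hkmem, List.count_cons]
      have : ¬ (w = k) := fun e => hwne (e ▸ hkmem)
      simp [this]

theorem pvInit_keys :
    (PySem.Dict.ofList (conjKeys.map (fun k => (k, (0 : Int))))).keys = conjKeys := by decide

theorem pvInit_getD : ∀ k ∈ conjKeys,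
    (PySem.Dict.ofList (conjKeys.map (fun k => (k, (0 : Int))))).getD k 0 = 0 := by decide

theorem conjunctions_eq (lines : List String) :
    conjunctions lines = conjKeys.map (fun k => (k, ((pvWords lines).count k : Int))) := by
  unfold conjunctions
  have hfold : ∀ (d : PySem.Dict String Int),
      lines.foldl (fun d line =>
        (PySem.Str.split₀ (PySem.Str.replace line "--" " ")).foldl
          (fun d word =>
            let nw := pvCleanA word
            if d.contains nw then d.insert nw (d.getD nw 0 + 1) else d) d) d
      = (pvWords lines).foldl pvStepA d := by
    intro d
    unfold pvWords
    induction lines generalizing d with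
    | nil => rfl
    | cons l ls ih =>
      simp only [List.foldl_cons, List.flatMap_cons, List.foldl_append, List.foldl_map]
      rw [ih, pvClean_eq]
      rfl
  rw [hfold]
  obtain ⟨h1, h2⟩ := pvLoopA (pvWords lines)
    (PySem.Dict.ofList (conjKeys.map (fun k => (k, (0 : Int))))) pvInit_keys
  rw [PySem.Dict.items_eq_map_keys _ (by rw [h1]; exact conjKeys_nodup) 0, h1]
  refine List.map_congr_left (fun k hk => ?_)
  rw [h2 k hk, pvInit_getD k hk]
  simp

theorem conjunctions_alt_eq (lines : List String) :
    conjunctions_alt lines = conjKeys.map (fun k => (k, ((pvWords lines).count k : Int))) := by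
  unfold conjunctions_alt
  refine List.map_congr_left (fun k _ => ?_)
  rw [PySem.Dict.getD_foldl_insert_add_one]
  simp [pvWords]

-- ===== VERDICT (by name: the statement is the Claim_ definition above) =====
theorem conjunctions_spec : Claim_equal_conjunctions := by
  intro lines _
  unfold Spec_conjunctions
  rw [conjunctions_eq, conjunctions_alt_eq]
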